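-- pv_equiv track=rewrite | github.com/rqzz/Anwendungsprojekt-Code_Classification | TrainingData/human_MOVIEWKN_2.py | movie_weekend
-- ===== SOURCE A (Python) =====
-- def movie_weekend(a, b):
--     l = []
--     k = []
--     for i in range(1, len(a)+1):
--         l.append(tuple([a[i-1], b[i-1], i]))
--
--     mul = list(map(lambda x: x[0]*x[1], l))
--     max_m = max(mul)
--     for i in range(len(mul)):
--         if mul[i]==max_m:
--             k.append(l[i])
--     if max(k, key=lambda x: x[1]) != min(k, key=lambda x: x[1]):
--         return max(k, key=lambda x: x[1])[2]
--     else: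
--         return k[0][2]
-- ===== SOURCE B (Python) =====
-- def movie_weekend(a, b):
--     return max(range(1, len(a) + 1), key=lambda i: (a[i - 1] * b[i - 1], b[i - 1]))
-- ===== Notes on version B (the rewrite author's own statement) =====
-- stated objective: simpler
-- what changed: Replaces A's tuple list, products list, max-of-products pass, tie-collection pass and max/min-by-b comparison with a single max over the indices under the lexicographic key (a[i-1]*b[i-1], b[i-1]), relying on max keeping the earliest extreme.
import Mathlib
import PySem

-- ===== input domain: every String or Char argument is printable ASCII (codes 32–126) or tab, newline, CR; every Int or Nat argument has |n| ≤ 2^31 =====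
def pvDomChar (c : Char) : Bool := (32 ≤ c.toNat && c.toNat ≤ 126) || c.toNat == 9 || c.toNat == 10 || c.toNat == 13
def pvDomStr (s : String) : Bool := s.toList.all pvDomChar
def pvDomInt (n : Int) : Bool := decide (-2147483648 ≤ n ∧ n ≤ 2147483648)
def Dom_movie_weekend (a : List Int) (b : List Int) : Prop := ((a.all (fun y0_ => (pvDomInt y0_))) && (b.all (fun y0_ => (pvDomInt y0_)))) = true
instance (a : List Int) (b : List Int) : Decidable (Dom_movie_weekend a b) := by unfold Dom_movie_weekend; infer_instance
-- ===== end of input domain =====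

-- B replaces A's tuple list, products list, max-of-products pass, tie-collection pass and
-- max/min-by-b comparison with one max over the indices 1..len(a) under the lexicographic
-- key (a[i-1]*b[i-1], b[i-1]) (objective: simpler).

-- ===== PORT A =====
-- the loop 'for i in range(1, len(a)+1): l.append((a[i-1], b[i-1], i))'; none = IndexError
def movieStep (a b : List Int) (acc : Option (List (Int × Int × Int))) (i : Int) :
    Option (List (Int × Int × Int)) :=
  match acc, PySem.List.pyGet? a (i - 1), PySem.List.pyGet? b (i - 1) with
  | some l, some x, some y => some (l ++ [(x, y, i)])
  | _, _, _ => none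

def movieL (a b : List Int) : Option (List (Int × Int × Int)) :=
  (PySem.List.pyRange 1 ((a.length : Int) + 1)).foldl (movieStep a b) (some [])

def movie_weekend (a : List Int) (b : List Int) : Int :=
  match movieL a b with
  | none => 0  -- IndexError: outside Pre_
  | some l =>
    let mul := l.map (fun x => x.1 * x.2.1)
    match PySem.List.max? mul (fun x => x) with
    | none => 0  -- ValueError on max([]): outside Pre_
    | some max_m =>
      let k := (PySem.List.pyRange 0 ((mul.length : Int))).foldl
        (fun acc i =>
          if PySem.List.pyGetD mul i 0 == max_m
          then acc ++ [PySem.List.pyGetD l i (0, 0, 0)] else acc) []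
      match PySem.List.max? k (fun x => x.2.1), PySem.List.min? k (fun x => x.2.1) with
      | some mx, some mn =>
        if mx ≠ mn then mx.2.2 else ((PySem.List.pyGet? k 0).getD (0, 0, 0)).2.2
      | _, _ => 0  -- unreachable: k is nonempty whenever this point is reached

-- ===== PORT B =====
def movie_weekend_alt (a : List Int) (b : List Int) : Int :=
  (PySem.List.max2? (PySem.List.pyRange 1 ((a.length : Int) + 1))
      (fun i => (PySem.List.pyGet? a (i - 1)).getD 0 * (PySem.List.pyGet? b (i - 1)).getD 0)
      (fun i => (PySem.List.pyGet? b (i - 1)).getD 0)).getD 0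
  -- the .getD 0 only covers the empty range (Python: ValueError), outside Pre_

-- ===== PRECONDITION & SPEC =====
-- A raises ValueError (max of an empty list) on empty a and IndexError when b is shorter than a.
def Pre_movie_weekend (a : List Int) (b : List Int) : Prop := a ≠ [] ∧ a.length ≤ b.length
instance (a : List Int) (b : List Int) : Decidable (Pre_movie_weekend a b) := by
  unfold Pre_movie_weekend; infer_instance
def pvWitness_movie_weekend : List Int × List Int := ([1, 2], [3, 4])

def Spec_movie_weekend (a : List Int) (b : List Int) (out : Int) : Prop := out = movie_weekend_alt a b
instance (a : List Int) (b : List Int) (out : Int) : Decidable (Spec_movie_weekend a b out) := by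
  unfold Spec_movie_weekend; infer_instance

-- ===== CLAIM (what is proved, stated in full; the proofs are below) =====
def Claim_equal_movie_weekend : Prop := ∀ (a : List Int) (b : List Int),
  Dom_movie_weekend a b → Pre_movie_weekend a b → Spec_movie_weekend a b (movie_weekend a b)

-- ===== LEMMAS AND PROOFS =====

def mwLex (p q : Int × Int) : Prop := p.1 < q.1 ∨ (p.1 = q.1 ∧ p.2 < q.2)

def mwGood {α : Type} (K : α → Int × Int) (L : List α) (t : α) : Prop :=
  ∃ L1 L2, L = L1 ++ t :: L2 ∧ (∀ y ∈ L1, mwLex (K y) (K t)) ∧ (∀ y ∈ L2, ¬ mwLex (K t) (K y))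

lemma mwLex_trans {p q r : Int × Int} (h1 : mwLex p q) (h2 : mwLex q r) : mwLex p r := by
  unfold mwLex at *; omega

lemma mwLex_of_not_of_lt {p q r : Int × Int} (h1 : ¬ mwLex p q) (h2 : mwLex p r) : mwLex q r := by
  unfold mwLex at *; omega

lemma mwTest_iff (a1 a2 b1 b2 : Int) :
    ((decide (a1 < b1) || (!decide (b1 < a1) && decide (a2 < b2))) = true) ↔
      mwLex (a1, a2) (b1, b2) := by
  unfold mwLex; simp; omega

lemma mwFoldGood {α : Type} (k1 k2 : α → Int) (L : List α) (hne : L ≠ []) :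
    ∃ t, PySem.List.max2? L k1 k2 = some t ∧ mwGood (fun y => (k1 y, k2 y)) L t := by
  induction L using List.reverseRecOn with
  | nil => exact absurd rfl hne
  | append_singleton L x ih =>
    rcases eq_or_ne L [] with rfl | hL
    · refine ⟨x, by simp [PySem.List.max2?], ⟨[], [], by simp, by simp, by simp⟩⟩
    · obtain ⟨t, ht, L1, L2, hsplit, h1, h2⟩ := ih hL
      have hstep : PySem.List.max2? (L ++ [x]) k1 k2 =
          (if (decide (k1 t < k1 x) || (!decide (k1 x < k1 t) && decide (k2 t < k2 x))) = true
           then some x else some t) := by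
        simp only [PySem.List.max2?] at ht ⊢
        rw [List.foldl_append, ht]
        rfl
      by_cases hc : mwLex (k1 t, k2 t) (k1 x, k2 x)
      · refine ⟨x, ?_, L, [], by simp, ?_, by simp⟩
        · rw [hstep, if_pos ((mwTest_iff _ _ _ _).mpr hc)]
        · intro y hy
          rw [hsplit] at hy
          rcases List.mem_append.mp hy with hy1 | hy2
          · exact mwLex_trans (h1 y hy1) hc
          · rcases List.mem_cons.mp hy2 with rfl | hy2
            · exact hc
            · exact mwLex_of_not_of_lt (h2 y hy2) hc
      · refine ⟨t, ?_, L1, L2 ++ [x], by rw [hsplit]; simp, h1, ?_⟩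
        · rw [hstep, if_neg (by rw [mwTest_iff]; exact hc)]
        · intro y hy
          rcases List.mem_append.mp hy with hy2 | hyx
          · exact h2 y hy2
          · rcases List.mem_singleton.mp hyx with rfl
            exact hc

lemma mwGood_unique {α : Type} (K : α → Int × Int) (L : List α) (t t' : α)
    (h : mwGood K L t) (h' : mwGood K L t') : t = t' := by
  obtain ⟨L1, L2, hs, h1, h2⟩ := h
  obtain ⟨M1, M2, hs', g1, g2⟩ := h'
  have heq : L1 ++ t :: L2 = M1 ++ t' :: M2 := by rw [← hs, ← hs']
  rcases List.append_eq_append_iff.mp heq with ⟨as, hM1, hcons⟩ | ⟨bs, hL1, hcons⟩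
  · cases as with
    | nil => exact (by simpa using hcons : t = t' ∧ _).1
    | cons u as' =>
      obtain ⟨ht, htL2⟩ : t = u ∧ L2 = as' ++ t' :: M2 := by simpa using hcons
      subst ht
      have hmem1 : t ∈ M1 := by rw [hM1]; simp
      have hc1 : mwLex (K t) (K t') := g1 t hmem1
      have hmem2 : t' ∈ L2 := by rw [htL2]; simp
      exact absurd hc1 (h2 t' hmem2)
  · cases bs with
    | nil => exact ((by simpa using hcons : t' = t ∧ _).1).symm
    | cons u bs' =>
      obtain ⟨ht, htM2⟩ : t' = u ∧ M2 = bs' ++ t :: L2 := by simpa using hcons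
      subst ht
      have hmem1 : t' ∈ L1 := by rw [hL1]; simp
      have hc1 : mwLex (K t') (K t) := h1 t' hmem1
      have hmem2 : t ∈ M2 := by rw [htM2]; simp
      exact absurd hc1 (g2 t hmem2)

lemma max?_as_max2? {α : Type} (L : List α) (key : α → Int) :
    PySem.List.max? L key = PySem.List.max2? L key (fun _ => (0 : Int)) := by
  simp only [PySem.List.max?, PySem.List.max2?]
  apply PySem.List.foldl_congr_mem
  intro acc x _
  cases acc with
  | none => rfl
  | some m => simp

lemma max?_const_head_aux {α : Type} (K : α → Int) (h : α) (t : List α)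
    (hc : ∀ y ∈ t, ¬ K h < K y) :
    t.foldl (fun acc x => match acc with
      | none => some x
      | some m => if K m < K x then some x else some m) (some h) = some h := by
  induction t with
  | nil => rfl
  | cons y ys ih =>
    simp only [List.foldl_cons]
    rw [if_neg (hc y (by simp))]
    exact ih (fun z hz => hc z (by simp [hz]))

lemma max?_const_head {α : Type} (K : α → Int) (h : α) (t : List α)
    (hc : ∀ y ∈ t, ¬ K h < K y) : PySem.List.max? (h :: t) K = some h := by
  simp only [PySem.List.max?, List.foldl_cons]
  exact max?_const_head_aux K h t hc

lemma pyGetD_map {α β : Type} (f : α → β) (l : List α) (i : Int) (d : β) (d' : α)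
    (h0 : 0 ≤ i) (h1 : i < (l.length : Int)) :
    PySem.List.pyGetD (l.map f) i d = f (PySem.List.pyGetD l i d') := by
  have e : i = ((i.toNat : Nat) : Int) := by omega
  have hlt : i.toNat < l.length := by omega
  rw [e]
  unfold PySem.List.pyGetD
  rw [PySem.List.pyGet?_natCast, PySem.List.pyGet?_natCast, List.getElem?_map]
  simp [List.getElem?_eq_getElem hlt]

def mwG (a b : List Int) (i : Int) : Int × Int × Int :=
  ((PySem.List.pyGet? a (i - 1)).getD 0, (PySem.List.pyGet? b (i - 1)).getD 0, i)

def mwKB (a b : List Int) (i : Int) : Int × Int :=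
  ((PySem.List.pyGet? a (i - 1)).getD 0 * (PySem.List.pyGet? b (i - 1)).getD 0,
   (PySem.List.pyGet? b (i - 1)).getD 0)

lemma movieL_fold (a b : List Int) (js : List Int) (acc : List (Int × Int × Int))
    (hjs : ∀ j ∈ js, (PySem.List.pyGet? a (j - 1)).isSome ∧ (PySem.List.pyGet? b (j - 1)).isSome) :
    js.foldl (movieStep a b) (some acc) = some (acc ++ js.map (mwG a b)) := by
  induction js generalizing acc with
  | nil => simp
  | cons j js ih =>
    obtain ⟨hx, hy⟩ := hjs j (by simp)
    obtain ⟨x, hx⟩ := Option.isSome_iff_exists.mp hx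
    obtain ⟨y, hy⟩ := Option.isSome_iff_exists.mp hy
    simp only [List.foldl_cons, List.map_cons]
    have hstep : movieStep a b (some acc) j = some (acc ++ [(x, y, j)]) := by
      simp [movieStep, hx, hy]
    rw [hstep, ih _ (fun z hz => hjs z (by simp [hz]))]
    simp [mwG, hx, hy]

theorem movie_weekend_eq_alt (a b : List Int) (hne : a ≠ []) (hlen : a.length ≤ b.length) :
    movie_weekend a b = movie_weekend_alt a b := by
  have hn : 0 < a.length := List.length_pos_iff.mpr hne
  have hgets : ∀ j ∈ PySem.List.pyRange 1 ((a.length : Int) + 1),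
      (PySem.List.pyGet? a (j - 1)).isSome ∧ (PySem.List.pyGet? b (j - 1)).isSome := by
    intro j hj
    rw [PySem.List.mem_pyRange_one] at hj
    have e : j - 1 = (((j - 1).toNat : Nat) : Int) := by omega
    constructor <;> rw [e, PySem.List.pyGet?_natCast] <;> simp <;> omega
  have hL : movieL a b = some ((PySem.List.pyRange 1 ((a.length : Int) + 1)).map (mwG a b)) := by
    unfold movieL
    simpa using movieL_fold a b _ [] hgets
  set idx := PySem.List.pyRange 1 ((a.length : Int) + 1) with hidx_def
  set L := idx.map (mwG a b) with hL_def
  have h1mem : (1 : Int) ∈ idx := by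
    rw [hidx_def, PySem.List.mem_pyRange_one]; omega
  have hidxne : idx ≠ [] := List.ne_nil_of_mem h1mem
  have hLne : L ≠ [] := by simp [hL_def, hidxne]
  -- reduce A to its core
  have hkey : ∀ t ∈ L, mwKB a b t.2.2 = (t.1 * t.2.1, t.2.1) := by
    intro t ht
    obtain ⟨i, hi, rfl⟩ := List.mem_map.mp ht
    rfl
  unfold movie_weekend
  rw [hL]
  split
  next heq => exact absurd heq (by simp)
  next l heq =>
  injection heq with heq
  subst heq
  simp only []
  split
  next hmax => exact absurd ((PySem.List.max?_eq_none_iff _ _).mp hmax) (by simp [hLne])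
  next max_m hmax =>
  -- the tie-collection loop is filter
  have hlen2 : (((L.map (fun x : Int × Int × Int => x.1 * x.2.1)).length : Nat) : Int) = ((L.length : Nat) : Int) := by simp
  have hbody : ∀ (acc : List (Int × Int × Int)), ∀ i ∈ PySem.List.pyRange 0 (L.length : Int),
      (if PySem.List.pyGetD (L.map (fun x => x.1 * x.2.1)) i 0 == max_m
        then acc ++ [PySem.List.pyGetD L i (0, 0, 0)] else acc)
      = (fun acc (t : Int × Int × Int) => if t.1 * t.2.1 == max_m then acc ++ [t] else acc) acc
          (PySem.List.pyGetD L i (0, 0, 0)) := by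
    intro acc i hi
    rw [PySem.List.mem_pyRange_one] at hi
    rw [pyGetD_map (fun x => x.1 * x.2.1) L i 0 (0, 0, 0) hi.1 hi.2]
  have hk : List.foldl
      (fun acc i => if PySem.List.pyGetD (L.map (fun x => x.1 * x.2.1)) i 0 == max_m
        then acc ++ [PySem.List.pyGetD L i (0, 0, 0)] else acc) []
      (PySem.List.pyRange 0 ((L.map (fun x : Int × Int × Int => x.1 * x.2.1)).length : Int))
      = L.filter (fun t => t.1 * t.2.1 == max_m) := by
    rw [hlen2, PySem.List.foldl_congr_mem _ _ _ _ hbody,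
      PySem.List.foldl_pyRange_zero_pyGetD' L (0, 0, 0)
        (fun acc (t : Int × Int × Int) => if t.1 * t.2.1 == max_m then acc ++ [t] else acc) []]
    simpa using PySem.List.foldl_append_if_eq_filter
      (fun t : Int × Int × Int => t.1 * t.2.1 == max_m) L []
  rw [hk]
  -- the filtered list is nonempty
  have hkne : L.filter (fun t => t.1 * t.2.1 == max_m) ≠ [] := by
    obtain ⟨t0, ht0L, ht0⟩ := List.mem_map.mp (PySem.List.max?_mem hmax)
    exact List.ne_nil_of_mem (List.mem_filter.mpr ⟨ht0L, by simp [ht0]⟩)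
  obtain ⟨mx, hmx⟩ : ∃ mx, PySem.List.max? (L.filter fun t => t.1 * t.2.1 == max_m)
      (fun x : Int × Int × Int => x.2.1) = some mx := by
    cases h : PySem.List.max? (L.filter fun t => t.1 * t.2.1 == max_m)
        (fun x : Int × Int × Int => x.2.1) with
    | none => exact absurd ((PySem.List.max?_eq_none_iff _ _).mp h) hkne
    | some m => exact ⟨m, rfl⟩
  obtain ⟨mn, hmn⟩ : ∃ mn, PySem.List.min? (L.filter fun t => t.1 * t.2.1 == max_m)
      (fun x : Int × Int × Int => x.2.1) = some mn := by
    cases h : PySem.List.min? (L.filter fun t => t.1 * t.2.1 == max_m)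
        (fun x : Int × Int × Int => x.2.1) with
    | none => exact absurd ((PySem.List.min?_eq_none_iff _ _).mp h) hkne
    | some m => exact ⟨m, rfl⟩
  rw [hmx, hmn]
  show (if mx ≠ mn then mx.2.2
    else ((PySem.List.pyGet? (L.filter fun t => t.1 * t.2.1 == max_m) 0).getD (0, 0, 0)).2.2)
    = movie_weekend_alt a b
  -- basic facts about mx and max_m
  have hmxk : mx ∈ L.filter (fun t => t.1 * t.2.1 == max_m) := PySem.List.max?_mem hmx
  have hmxL : mx ∈ L := (List.mem_filter.mp hmxk).1
  have hPmx : mx.1 * mx.2.1 = max_m := by simpa using (List.mem_filter.mp hmxk).2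
  have hub : ∀ y ∈ L, y.1 * y.2.1 ≤ max_m := by
    intro y hy
    simpa using PySem.List.max?_isMax hmax _ (List.mem_map_of_mem (f := fun x => x.1 * x.2.1) hy)
  -- A's answer is mx.2.2
  have hA : (if mx ≠ mn then mx.2.2
      else ((PySem.List.pyGet? (L.filter fun t => t.1 * t.2.1 == max_m) 0).getD (0, 0, 0)).2.2)
      = mx.2.2 := by
    by_cases hmm : mx = mn
    · rw [if_neg (by simp [hmm])]
      have hKeq : ∀ y ∈ L.filter (fun t => t.1 * t.2.1 == max_m), y.2.1 = mx.2.1 := by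
        intro y hy
        refine le_antisymm (PySem.List.max?_isMax hmx y hy) ?_
        have := PySem.List.min?_isMin hmn y hy
        rw [← hmm] at this
        exact this
      cases hke : L.filter (fun t => t.1 * t.2.1 == max_m) with
      | nil => exact absurd hke hkne
      | cons h t =>
        have hmax_h : PySem.List.max? (h :: t) (fun x : Int × Int × Int => x.2.1) = some h := by
          refine max?_const_head _ h t ?_
          intro y hy
          have h1 := hKeq y (by rw [hke]; simp [hy])
          have h2 := hKeq h (by rw [hke]; simp)
          omega
        rw [hke] at hmx
        have hmxh : mx = h := by rw [hmax_h] at hmx; exact (Option.some_inj.mp hmx).symm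
        have hget : PySem.List.pyGet? (h :: t) (0 : Int) = some h := by
          rw [show (0 : Int) = ((0 : Nat) : Int) from rfl, PySem.List.pyGet?_natCast]
          rfl
        rw [hget, hmxh]
        rfl
    · rw [if_pos hmm]
  rw [hA]
  -- mwGood decomposition of the filtered list under the b-key
  obtain ⟨tG, htG, hGk⟩ := mwFoldGood (fun x : Int × Int × Int => x.2.1) (fun _ => (0 : Int))
    (L.filter fun t => t.1 * t.2.1 == max_m) hkne
  rw [← max?_as_max2?] at htG
  have htGmx : tG = mx := by rw [htG] at hmx; exact Option.some_inj.mp hmx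
  obtain ⟨k1, k2, hksplit, hk1, hk2⟩ := htGmx ▸ hGk
  have hk1' : ∀ y ∈ k1, y.2.1 < mx.2.1 := by
    intro y hy
    have := hk1 y hy
    unfold mwLex at this
    simp only at this
    omega
  have hk2' : ∀ y ∈ k2, ¬ mx.2.1 < y.2.1 := by
    intro y hy
    have := hk2 y hy
    unfold mwLex at this
    simp only at this
    omega
  -- split L along the filter decomposition
  obtain ⟨l₁, l₂, hLsplit, hf1, hf2⟩ := List.filter_eq_append_iff.mp hksplit
  obtain ⟨l₂₁, l₂₂, hl2split, hno, hpmx2, hf22⟩ := List.filter_eq_cons_iff.mp hf2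
  subst hl2split
  have hLsplit' : L = (l₁ ++ l₂₁) ++ mx :: l₂₂ := by rw [hLsplit]; simp
  -- A's winning index is the first lexicographically greatest index
  have goodA : mwGood (mwKB a b) idx mx.2.2 := by
    refine ⟨(l₁ ++ l₂₁).map (fun t => t.2.2), l₂₂.map (fun t => t.2.2), ?_, ?_, ?_⟩
    · have hidxL : idx = L.map (fun t => t.2.2) := by
        rw [hL_def, List.map_map]
        exact (List.map_id _).symm
      rw [hidxL, hLsplit']
      simp
    · intro y hy
      obtain ⟨z, hz, rfl⟩ := List.mem_map.mp hy
      have hzL : z ∈ L := by rw [hLsplit']; exact List.mem_append.mpr (Or.inl hz)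
      rw [hkey z hzL, hkey mx hmxL]
      by_cases hpz : (z.1 * z.2.1 == max_m) = true
      · have hz' : z.1 * z.2.1 = max_m := by simpa using hpz
        rcases List.mem_append.mp hz with hz1 | hz21
        · have hzk1 : z ∈ k1 := by rw [← hf1]; exact List.mem_filter.mpr ⟨hz1, hpz⟩
          right
          exact ⟨by rw [hz', hPmx], hk1' z hzk1⟩
        · exact absurd hpz (hno z hz21)
      · left
        rw [hPmx]
        exact lt_of_le_of_ne (hub z hzL) (by simpa using hpz)
    · intro y hy
      obtain ⟨z, hz, rfl⟩ := List.mem_map.mp hy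
      have hzL : z ∈ L := by rw [hLsplit']; simp [hz]
      rw [hkey mx hmxL, hkey z hzL]
      by_cases hpz : (z.1 * z.2.1 == max_m) = true
      · have hz' : z.1 * z.2.1 = max_m := by simpa using hpz
        have hzk2 : z ∈ k2 := by rw [← hf22]; exact List.mem_filter.mpr ⟨hz, hpz⟩
        rintro (h | ⟨h1, h2⟩)
        · rw [hPmx, hz'] at h; exact lt_irrefl _ h
        · exact hk2' z hzk2 h2
      · rintro (h | ⟨h1, h2⟩)
        · rw [hPmx] at h
          exact absurd (hub z hzL) (not_le.mpr h)
        · rw [hPmx] at h1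
          exact (by simpa using hpz : z.1 * z.2.1 ≠ max_m) h1.symm
  -- B computes the same first lexicographically greatest index
  obtain ⟨tB, htB, hGB⟩ := mwFoldGood
    (fun i => (PySem.List.pyGet? a (i - 1)).getD 0 * (PySem.List.pyGet? b (i - 1)).getD 0)
    (fun i => (PySem.List.pyGet? b (i - 1)).getD 0) idx hidxne
  have htBmx : tB = mx.2.2 := mwGood_unique (mwKB a b) idx tB mx.2.2 hGB goodA
  unfold movie_weekend_alt
  rw [← hidx_def, htB, htBmx]
  rfl

-- ===== VERDICT (by name: the statement is the Claim_ definition above) =====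
theorem movie_weekend_spec : Claim_equal_movie_weekend := by
  intro a b _ hpre
  unfold Spec_movie_weekend
  exact movie_weekend_eq_alt a b hpre.1 hpre.2
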